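-- pv_equiv track=rewrite | github.com/Atomic-Panda/Introduction_to_NLP | sp.py | sent_to_seg
-- ===== SOURCE A (Python) =====
-- def sent_to_seg(x, y):
--     # 根据 x, y 向量得到一个句子的分词结果
--     cache = ''
--     words = []
--     for i in range(len(x)):
--         cache += x[i]
--         if y[i] == 2 or y[i] == 3:
--             words.append(cache)
--             cache = ''
--     if cache:
--         words.append(cache)
--     return words
-- ===== SOURCE B (Python) =====
-- def sent_to_seg(x, y):
--     # index-then-slice: collect cut positions first, then emit words as joined slices
--     n = len(x)
--     cuts = [i for i in range(n) if y[i] == 2 or y[i] == 3]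
--     words = []
--     prev = 0
--     for b in cuts:
--         words.append(''.join(x[prev:b + 1]))
--         prev = b + 1
--     tail = ''.join(x[prev:])
--     if tail:
--         words.append(tail)
--     return words
-- ===== Notes on version B (the rewrite author's own statement) =====
-- stated objective: alternative
-- what changed: B replaces A's incremental cache accumulation with two passes: collect the cut indices where y[i] is 2 or 3, then emit each word as the join of the slice between consecutive cuts, appending the joined tail slice only if nonempty.
import Mathlib
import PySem

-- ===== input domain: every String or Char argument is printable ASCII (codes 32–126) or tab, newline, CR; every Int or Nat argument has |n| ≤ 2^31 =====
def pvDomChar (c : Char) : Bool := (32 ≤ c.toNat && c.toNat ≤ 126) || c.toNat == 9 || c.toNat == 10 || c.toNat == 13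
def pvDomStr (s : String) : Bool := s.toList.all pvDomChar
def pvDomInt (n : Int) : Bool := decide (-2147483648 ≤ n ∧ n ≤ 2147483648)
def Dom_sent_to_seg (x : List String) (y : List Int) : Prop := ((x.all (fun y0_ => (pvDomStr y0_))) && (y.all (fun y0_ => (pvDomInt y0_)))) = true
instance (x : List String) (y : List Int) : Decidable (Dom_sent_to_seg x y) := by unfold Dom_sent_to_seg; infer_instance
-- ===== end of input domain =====

-- B replaces A's incremental cache accumulation by a cut-index pass followed by joined slices (alternative decomposition, same cost).

-- ===== PORT A =====
-- loop body of A: cache += x[i]; if y[i] in (2,3): words.append(cache); cache = ''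
-- (pyGetD defaults are never consulted under Pre_: i < len(x) always, and Pre_ gives i < len(y))
def pvAstep (x : List String) (y : List Int) (st : String × List String) (i : Int) : String × List String :=
  let cache := st.1 ++ PySem.List.pyGetD x i ""
  if PySem.List.pyGetD y i 0 == 2 || PySem.List.pyGetD y i 0 == 3 then ("", st.2 ++ [cache])
  else (cache, st.2)

def sent_to_seg (x : List String) (y : List Int) : List String :=
  let s := (PySem.List.pyRange 0 (x.length : Int) 1).foldl (pvAstep x y) ("", [])
  if s.1 ≠ "" then s.2 ++ [s.1] else s.2

-- ===== PORT B =====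
def pvCut (y : List Int) (i : Int) : Bool :=
  PySem.List.pyGetD y i 0 == 2 || PySem.List.pyGetD y i 0 == 3

-- loop body of B: words.append(''.join(x[prev:b+1])); prev = b+1
def pvBstep (x : List String) (st : Int × List String) (b : Int) : Int × List String :=
  (b + 1, st.2 ++ [PySem.Str.join "" (PySem.List.slice x (some st.1) (some (b + 1)))])

def sent_to_seg_alt (x : List String) (y : List Int) : List String :=
  let cuts := (PySem.List.pyRange 0 (x.length : Int) 1).filter (pvCut y)
  let s := cuts.foldl (pvBstep x) ((0 : Int), [])
  let tail := PySem.Str.join "" (PySem.List.slice x (some s.1) none)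
  if tail ≠ "" then s.2 ++ [tail] else s.2

-- ===== PRECONDITION & SPEC =====
-- A indexes y[i] for every i < len(x): it raises IndexError iff len(y) < len(x).
def Pre_sent_to_seg (x : List String) (y : List Int) : Prop := x.length ≤ y.length
instance (x : List String) (y : List Int) : Decidable (Pre_sent_to_seg x y) := by unfold Pre_sent_to_seg; infer_instance
def pvWitness_sent_to_seg : List String × List Int := (["ab", "c", "d"], [0, 2, 0])

def Spec_sent_to_seg (x : List String) (y : List Int) (out : List String) : Prop := out = sent_to_seg_alt x y
instance (x : List String) (y : List Int) (out : List String) : Decidable (Spec_sent_to_seg x y out) := by unfold Spec_sent_to_seg; infer_instance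

-- ===== CLAIM (what is proved, stated in full; the proofs are below) =====
def Claim_equal_sent_to_seg : Prop := ∀ (x : List String) (y : List Int), Dom_sent_to_seg x y → Pre_sent_to_seg x y → Spec_sent_to_seg x y (sent_to_seg x y)

-- ===== LEMMAS AND PROOFS =====

theorem chars_join_nil_flatten (l : List (List Char)) : PySem.Chars.join [] l = l.flatten := by
  match l with
  | [] => rfl
  | [a] => rw [PySem.Chars.join_singleton]; simp
  | a :: b :: rest =>
    rw [PySem.Chars.join_cons_cons, chars_join_nil_flatten (b :: rest)]
    simp

theorem str_join_empty_append (l : List String) (s : String) :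
    PySem.Str.join "" (l ++ [s]) = PySem.Str.join "" l ++ s := by
  apply String.toList_injective
  simp [PySem.Str.toList_join, chars_join_nil_flatten]

-- extending A's cache by x[n] is extending the joined slice by one element
theorem join_take_succ (x : List String) (p n : Nat) (hp : p ≤ n) (hn : n < x.length) :
    PySem.Str.join "" ((x.drop p).take (n + 1 - p)) =
      PySem.Str.join "" ((x.drop p).take (n - p)) ++ PySem.List.pyGetD x (n : Int) "" := by
  have hlen : n - p < (x.drop p).length := by simp [List.length_drop]; omega
  have hsplit : (x.drop p).take (n + 1 - p) = (x.drop p).take (n - p) ++ [(x.drop p)[n - p]] := by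
    have h1 : n + 1 - p = (n - p) + 1 := by omega
    rw [h1, List.take_add_one, List.getElem?_eq_getElem hlen]
    rfl
  rw [hsplit, str_join_empty_append, PySem.List.pyGetD_natCast]
  congr 1
  rw [List.getElem_drop, List.getD_eq_getElem x "" hn]
  congr 1
  omega

theorem str_join_nil : PySem.Str.join "" ([] : List String) = "" := by decide

-- loop invariant: after processing indices [0, n), B's words equal A's words,
-- B's prev is some p ≤ n, and A's cache is the join of x[p:n]
theorem pv_inv (x : List String) (y : List Int) (n : Nat) (hn : n ≤ x.length) :
    ∃ p : Nat, p ≤ n ∧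
      ((PySem.List.pyRange 0 (n : Int) 1).filter (pvCut y)).foldl (pvBstep x) ((0 : Int), []) =
        ((p : Int), ((PySem.List.pyRange 0 (n : Int) 1).foldl (pvAstep x y) ("", [])).2) ∧
      ((PySem.List.pyRange 0 (n : Int) 1).foldl (pvAstep x y) ("", [])).1 =
        PySem.Str.join "" ((x.drop p).take (n - p)) := by
  induction n with
  | zero => exact ⟨0, le_refl _, rfl, str_join_nil.symm⟩
  | succ n ih =>
    obtain ⟨p, hp, hB, hA⟩ := ih (by omega)
    have hrange : PySem.List.pyRange 0 ((n + 1 : Nat) : Int) 1 =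
        PySem.List.pyRange 0 (n : Int) 1 ++ [(n : Int)] := by
      push_cast
      exact PySem.List.pyRange_one_succ_right (by positivity)
    have hjoin := join_take_succ x p n hp (by omega)
    have hcast : ((n : Int) + 1) = ((n + 1 : Nat) : Int) := by push_cast; ring
    rw [hrange, List.filter_append, List.foldl_append, List.foldl_append, hB]
    generalize hS : (PySem.List.pyRange 0 (n : Int) 1).foldl (pvAstep x y) ("", []) = S at hA ⊢
    by_cases hc : pvCut y (n : Int) = true
    · refine ⟨n + 1, by omega, ?_, ?_⟩
      · rw [List.filter_singleton, hc, cond_true]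
        simp only [List.foldl_cons, List.foldl_nil]
        unfold pvBstep pvAstep pvCut at *
        rw [if_pos hc, hA]
        simp only [Prod.mk.injEq]
        refine ⟨hcast, ?_⟩
        rw [hcast, PySem.List.slice_natCast x p (n + 1), hjoin]
      · simp only [List.foldl_cons, List.foldl_nil]
        unfold pvAstep pvCut at *
        rw [if_pos hc, Nat.sub_self, List.take_zero]
        exact str_join_nil.symm
    · have hc' : pvCut y (n : Int) = false := by simpa using hc
      unfold pvCut at hc'
      refine ⟨p, by omega, ?_, ?_⟩
      · rw [List.filter_singleton]
        unfold pvCut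
        rw [hc', cond_false, List.foldl_nil, List.foldl_cons, List.foldl_nil]
        unfold pvAstep
        rw [if_neg (by rw [hc']; exact Bool.false_ne_true)]
      · simp only [List.foldl_cons, List.foldl_nil]
        unfold pvAstep
        rw [if_neg (by rw [hc']; exact Bool.false_ne_true), hA]
        exact hjoin.symm

-- ===== VERDICT (by name: the statement is the Claim_ definition above) =====
theorem sent_to_seg_spec : Claim_equal_sent_to_seg := by
  intro x y _ _
  unfold Spec_sent_to_seg
  simp only [sent_to_seg, sent_to_seg_alt]
  obtain ⟨p, hp, hB, hA⟩ := pv_inv x y x.length (le_refl _)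
  rw [hB, hA]
  have htail : PySem.List.slice x (some (p : Int)) none = x.drop p := by
    rw [PySem.List.slice_from x (by positivity)]
    simp
  have htake : (x.drop p).take (x.length - p) = x.drop p := by
    apply List.take_of_length_le
    simp
  rw [htail, htake]
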